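-- pv_equiv track=rewrite | github.com/ShuvalovAnthony/ez_python | Karen/9/5284/5284.py | check
-- ===== SOURCE A (Python) =====
-- def check(row: list):
--     povtor = []
--     uniq = []
--     sorted_row = sorted(row)
--
--     for num in row:
--         if row.count(num) == 3:
--             povtor.append(num)
--         if row.count(num) == 1:
--             uniq.append(num)
--
--     return (
--         ((sorted_row[0] + sorted_row[-1])**2 > sum([i**2 for i in sorted_row[1:-1]])) or
--         (len(povtor) == 3 and len(uniq) == 3)
--     )
-- ===== SOURCE B (Python) =====
-- def check(row: list):
--     mn = mx = row[0]
--     sum_sq = 0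
--     freq = {}
--     for x in row:
--         if x < mn:
--             mn = x
--         if mx < x:
--             mx = x
--         sum_sq += x * x
--         freq[x] = freq.get(x, 0) + 1
--     triples = 0
--     singles = 0
--     for c in freq.values():
--         if c == 3:
--             triples += 1
--         if c == 1:
--             singles += 1
--     return (mn + mx) ** 2 > sum_sq - mn * mn - mx * mx or (triples == 1 and singles == 3)
-- ===== Notes on version B (the rewrite author's own statement) =====
-- stated objective: faster
-- what changed: Replaces the sort plus quadratic row.count scans with a single pass maintaining running min, max, sum of squares and a frequency dict: condition 1 becomes the closed form (mn+mx)^2 > sum_sq - mn^2 - mx^2 (the middle slice of the sorted list omits exactly one min and one max), and condition 2 becomes 'exactly one frequency-3 value and exactly three frequency-1 values'.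
import Mathlib
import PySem

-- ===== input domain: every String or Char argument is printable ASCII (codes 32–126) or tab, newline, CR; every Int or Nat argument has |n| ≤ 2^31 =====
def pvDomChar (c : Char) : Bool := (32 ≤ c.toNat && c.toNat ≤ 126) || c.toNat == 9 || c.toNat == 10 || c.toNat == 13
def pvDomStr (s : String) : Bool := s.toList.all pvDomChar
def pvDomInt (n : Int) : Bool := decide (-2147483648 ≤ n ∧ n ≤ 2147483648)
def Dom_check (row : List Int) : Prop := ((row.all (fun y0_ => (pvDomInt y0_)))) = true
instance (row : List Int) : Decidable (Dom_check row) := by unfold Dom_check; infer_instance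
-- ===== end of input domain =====

-- B replaces the sort and the quadratic row.count scans by one O(n) pass (running min/max/sum of
-- squares + a frequency dict) and closed-form tests; objective: faster.

-- ===== PORT A =====
def check (row : List Int) : Bool :=
  let sorted_row := PySem.List.sorted row (fun x => x) false
  -- the loop appends to povtor / uniq; state = (povtor, uniq)
  let pu := row.foldl (fun (s : List Int × List Int) num =>
      (if PySem.List.count row num == 3 then s.1 ++ [num] else s.1,
       if PySem.List.count row num == 1 then s.2 ++ [num] else s.2)) ([], [])
  match PySem.List.pyGet? sorted_row 0, PySem.List.pyGet? sorted_row (-1) with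
  | some a0, some an =>
      (decide ((a0 + an) ^ 2 > ((PySem.List.slice sorted_row (some 1) (some (-1))).map (fun i => i ^ 2)).sum)
        || (pu.1.length == 3 && pu.2.length == 3))
  | _, _ => false   -- sorted_row[0] raises IndexError (row = []); excluded by Pre_check

-- ===== PORT B =====
def check_alt (row : List Int) : Bool :=
  match PySem.List.pyGet? row 0 with
  | none => false   -- row[0] raises IndexError (row = []); excluded by Pre_check
  | some h =>
    -- one pass: state = (mn, mx, sum_sq, freq)
    let st := row.foldl (fun (s : Int × Int × Int × PySem.Dict Int Int) x =>
        (if x < s.1 then x else s.1,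
         if s.2.1 < x then x else s.2.1,
         s.2.2.1 + x * x,
         s.2.2.2.modify x 0 (· + 1))) (h, h, 0, PySem.Dict.empty)
    -- second loop over freq.values: state = (triples, singles)
    let ts := st.2.2.2.values.foldl (fun (p : Int × Int) c =>
        (if c == 3 then p.1 + 1 else p.1,
         if c == 1 then p.2 + 1 else p.2)) (0, 0)
    (decide ((st.1 + st.2.1) ^ 2 > st.2.2.1 - st.1 * st.1 - st.2.1 * st.2.1)
      || (ts.1 == 1 && ts.2 == 3))

-- ===== PRECONDITION & SPEC =====
-- Pre_ excludes only the empty list, on which both Pythons raise IndexError.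
def Pre_check (row : List Int) : Prop := row ≠ []
instance (row : List Int) : Decidable (Pre_check row) := by unfold Pre_check; infer_instance
def pvWitness_check : List Int := [1, 2, 3]

def Spec_check (row : List Int) (out : Bool) : Prop := out = check_alt row
instance (row : List Int) (out : Bool) : Decidable (Spec_check row out) := by unfold Spec_check; infer_instance

-- ===== CLAIM (what is proved, stated in full; the proofs are below) =====
def Claim_equal_check : Prop := ∀ (row : List Int), Dom_check row → Pre_check row → Spec_check row (check row)

-- ===== LEMMAS AND PROOFS =====

-- xs[1:-1] is the list without its first and last element
theorem slice_one_neg_one (xs : List Int) :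
    PySem.List.slice xs (some 1) (some (-1)) = xs.tail.dropLast := by
  cases xs with
  | nil => simp [PySem.List.slice]
  | cons a t => simp [PySem.List.slice, List.dropLast_eq_take]

-- running "if x < acc then x else acc" is foldl min
theorem foldl_min_eq (l : List Int) (a : Int) :
    l.foldl (fun acc x => if x < acc then x else acc) a = l.foldl min a := by
  congr 1
  funext acc x
  rcases lt_trichotomy x acc with h | h | h <;> simp [min_def, h] <;> omega

theorem foldl_max_eq (l : List Int) (a : Int) :
    l.foldl (fun acc x => if acc < x then x else acc) a = l.foldl max a := by
  congr 1
  funext acc x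
  rcases lt_trichotomy acc x with h | h | h <;> simp [max_def, h] <;> omega

-- last element of a ≤-pairwise (sorted) list is an upper bound
theorem pairwise_le_getLast (l : List Int) (hp : l.Pairwise (· ≤ ·)) (hne : l ≠ []) :
    ∀ y ∈ l, y ≤ l.getLast hne := by
  induction l with
  | nil => simp
  | cons a t ih =>
      rcases List.pairwise_cons.mp hp with ⟨ha, hpt⟩
      intro y hy
      cases t with
      | nil =>
          simp only [List.mem_singleton] at hy
          simp [hy]
      | cons b u =>
          have hne' : b :: u ≠ [] := by simp
          rw [List.getLast_cons hne']
          rcases List.mem_cons.mp hy with hy | hy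
          · exact hy ▸ ha _ (List.getLast_mem hne')
          · exact ih hpt hne' y hy

-- countP over a nodup list only depends on the set of members
theorem countP_nodup_congr (l l' : List Int) (p : Int → Bool)
    (h : l.Nodup) (h' : l'.Nodup) (hm : ∀ x, x ∈ l ↔ x ∈ l') :
    l.countP p = l'.countP p := by
  have : l.Perm l' := (List.perm_ext_iff_of_nodup h h').mpr hm
  exact this.countP_eq p

theorem sum_map_const_of (l : List Int) (f : Int → Nat) (n : Nat) (h : ∀ x ∈ l, f x = n) :
    (l.map f).sum = n * l.length := by
  induction l with
  | nil => simp
  | cons a t ih =>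
      simp only [List.map_cons, List.sum_cons, List.length_cons,
        h a (List.mem_cons_self), ih (fun x hx => h x (List.mem_cons_of_mem _ hx))]
      ring

-- countP (count = n) over the whole list = n * (number of distinct values with count n)
theorem countP_count_eq (row : List Int) (n : Nat) :
    row.countP (fun x => row.count x == n) = n * (row.dedup.countP (fun x => row.count x == n)) := by
  rw [← List.sum_map_count_dedup_filter_eq_countP (fun x => row.count x == n) row,
      List.countP_eq_length_filter]
  exact sum_map_const_of _ _ n (fun x hx => by
    have := List.of_mem_filter hx
    simpa using this)

-- split B's four-accumulator loop into its components
theorem foldl4_split (l : List Int) (a b c : Int) (d : PySem.Dict Int Int) :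
    l.foldl (fun (s : Int × Int × Int × PySem.Dict Int Int) x =>
        (if x < s.1 then x else s.1,
         if s.2.1 < x then x else s.2.1,
         s.2.2.1 + x * x,
         s.2.2.2.modify x 0 (· + 1))) (a, b, c, d)
      = (l.foldl (fun acc x => if x < acc then x else acc) a,
         l.foldl (fun acc x => if acc < x then x else acc) b,
         c + (l.map (fun x => x * x)).sum,
         l.foldl (fun d x => d.modify x 0 (· + 1)) d) := by
  induction l generalizing a b c d with
  | nil => simp
  | cons x t ih => simp [ih, add_assoc]

-- split B's (triples, singles) loop
theorem foldl2_split (l : List Int) (a b : Int) :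
    l.foldl (fun (p : Int × Int) c =>
        (if c == 3 then p.1 + 1 else p.1,
         if c == 1 then p.2 + 1 else p.2)) (a, b)
      = (a + (l.countP (· == 3) : Int), b + (l.countP (· == 1) : Int)) := by
  induction l generalizing a b with
  | nil => simp
  | cons x t ih =>
      rw [List.foldl_cons, ih]
      by_cases h3 : x = (3 : Int) <;> by_cases h1 : x = (1 : Int) <;>
        simp [List.countP_cons, h3, h1] <;> first | (push_cast; ring) | simp

-- split A's (povtor, uniq) loop
theorem foldlA_split (row l : List Int) (a b : List Int) :
    l.foldl (fun (s : List Int × List Int) num =>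
      (if PySem.List.count row num == 3 then s.1 ++ [num] else s.1,
       if PySem.List.count row num == 1 then s.2 ++ [num] else s.2)) (a, b)
      = (a ++ l.filter (fun num => PySem.List.count row num == 3),
         b ++ l.filter (fun num => PySem.List.count row num == 1)) := by
  induction l generalizing a b with
  | nil => simp
  | cons x t ih =>
      rw [List.foldl_cons, ih]
      by_cases h3 : List.count x row = 3 <;>
        by_cases h1 : List.count x row = 1 <;>
          simp [List.filter_cons, h3, h1]

theorem cast_beq_lit (c m : Nat) (mi : Int) (hm : (m : Int) = mi) :
    ((c : Int) == mi) = (c == m) := by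
  subst hm
  by_cases h : c = m
  · simp [h]
  · have h2 : (c : Int) ≠ (m : Int) := by exact_mod_cast h
    simp [h, h2]

-- the middle of a sorted list: drop head and last
theorem sum_middle (a0 : Int) (t : List Int) (f : Int → Int) (ht : t ≠ []) :
    ((t.dropLast).map f).sum
      = (((a0 :: t).map f)).sum - f a0 - f ((a0 :: t).getLast (by simp)) := by
  have h2 : (t.map f).sum = ((t.dropLast).map f).sum + f (t.getLast ht) := by
    conv_lhs => rw [← List.dropLast_concat_getLast ht]
    simp
  rw [List.getLast_cons ht]
  simp only [List.map_cons, List.sum_cons, h2]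
  ring

theorem mul3_beq (d : Nat) : (3 * d == 3) = (d == 1) := by
  by_cases h : d = 1
  · simp [h]
  · have : 3 * d ≠ 3 := by omega
    simp [h, this]

theorem check_spec_aux : ∀ (row : List Int), row ≠ [] → check row = check_alt row := by
  intro row hne
  obtain ⟨h, rest, hrow⟩ : ∃ h rest, row = h :: rest := by
    cases row with
    | nil => exact absurd rfl hne
    | cons a t => exact ⟨a, t, rfl⟩
  have hsne : PySem.List.sorted row (fun x => x) false ≠ [] := by
    simp [PySem.List.sorted_eq_nil_iff, hne]
  obtain ⟨a0, t, hs⟩ : ∃ a0 t, PySem.List.sorted row (fun x => x) false = a0 :: t := by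
    cases hq : PySem.List.sorted row (fun x => x) false with
    | nil => exact absurd hq hsne
    | cons a t => exact ⟨a, t, rfl⟩
  have hperm : (a0 :: t).Perm row := hs ▸ PySem.List.sorted_perm row (fun x => x) false
  have hmem : ∀ y : Int, y ∈ (a0 :: t) ↔ y ∈ row := fun y => hperm.mem_iff
  have ha0row : a0 ∈ row := (hmem a0).mp (List.mem_cons_self ..)
  have hpw : (a0 :: t).Pairwise (· ≤ ·) := by
    have hp := PySem.List.sorted_pairwise row (fun x => x)
    rw [hs] at hp
    simpa using hp
  have hlow : ∀ y ∈ row, a0 ≤ y := by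
    intro y hy
    rcases List.mem_cons.mp ((hmem y).mpr hy) with h' | h'
    · exact h' ▸ le_refl _
    · exact (List.pairwise_cons.mp hpw).1 y h'
  have htne : (a0 :: t) ≠ [] := by simp
  have hLrow : (a0 :: t).getLast htne ∈ row := (hmem _).mp (List.getLast_mem htne)
  have hhigh : ∀ y ∈ row, y ≤ (a0 :: t).getLast htne := fun y hy =>
    pairwise_le_getLast _ hpw htne y ((hmem y).mpr hy)
  have hmn : row.foldl min h = a0 := by
    have h1 := PySem.List.foldl_min_le row h
    have hm := PySem.List.foldl_min_mem row h
    have hin : row.foldl min h ∈ row := by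
      rcases hm with hm | hm
      · rw [hm, hrow]; exact List.mem_cons_self ..
      · exact hm
    exact le_antisymm (h1.2 a0 ha0row) (hlow _ hin)
  have hmx : row.foldl max h = (a0 :: t).getLast htne := by
    have h1 := PySem.List.le_foldl_max row h
    have hm := PySem.List.foldl_max_mem row h
    have hin : row.foldl max h ∈ row := by
      rcases hm with hm | hm
      · rw [hm, hrow]; exact List.mem_cons_self ..
      · exact hm
    exact le_antisymm (hhigh _ hin) (h1.2 _ hLrow)
  -- characterize A
  have e0 : PySem.List.pyGet? (PySem.List.sorted row (fun x => x) false) 0 = some a0 := by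
    rw [hs]; exact PySem.List.pyGet?_zero_cons ..
  have e1 : PySem.List.pyGet? (PySem.List.sorted row (fun x => x) false) (-1)
      = some ((a0 :: t).getLast htne) := by
    rw [PySem.List.pyGet?_neg_one, hs, List.getLast?_eq_some_getLast]
  have hA : check row =
      (decide ((a0 + (a0 :: t).getLast htne) ^ 2 >
          (((a0 :: t).tail.dropLast).map (fun i => i ^ 2)).sum)
        || ((3 * row.dedup.countP (fun x => row.count x == 3) == 3)
            && (1 * row.dedup.countP (fun x => row.count x == 1) == 3))) := by
    simp only [check, e0, e1, foldlA_split, slice_one_neg_one, List.nil_append]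
    simp only [hs, PySem.List.count_eq]
    rw [← List.countP_eq_length_filter, ← List.countP_eq_length_filter,
        countP_count_eq row 3, countP_count_eq row 1]
  -- characterize B
  have e2 : PySem.List.pyGet? row 0 = some h := by
    rw [hrow]; exact PySem.List.pyGet?_zero_cons ..
  have hctr : row.foldl (fun (d : PySem.Dict Int Int) x => d.modify x 0 (· + 1)) PySem.Dict.empty
      = PySem.Dict.counter row := (PySem.Dict.counter_eq_foldl row).symm
  have hvals : (PySem.Dict.counter row).values
      = (PySem.Set.ofList row).map (fun k => ((row.count k : Nat) : Int)) := by
    simp [PySem.Dict.values, PySem.Dict.items_counter]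
  have hcast3 : ∀ (l : List Int),
      l.countP (fun k => ((row.count k : Nat) : Int) == 3) = l.countP (fun k => row.count k == 3) :=
    fun l => List.countP_congr (fun k _ => by
      rw [cast_beq_lit (List.count k row) 3 3 (by norm_num)])
  have hcast1 : ∀ (l : List Int),
      l.countP (fun k => ((row.count k : Nat) : Int) == 1) = l.countP (fun k => row.count k == 1) :=
    fun l => List.countP_congr (fun k _ => by
      rw [cast_beq_lit (List.count k row) 1 1 (by norm_num)])
  have hset3 : (PySem.Set.ofList row).countP (fun k => row.count k == 3)
      = row.dedup.countP (fun x => row.count x == 3) :=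
    countP_nodup_congr _ _ _ (PySem.Set.nodup_ofList row) (List.nodup_dedup row)
      (fun x => by simp [PySem.Set.mem_ofList, List.mem_dedup])
  have hset1 : (PySem.Set.ofList row).countP (fun k => row.count k == 1)
      = row.dedup.countP (fun x => row.count x == 1) :=
    countP_nodup_congr _ _ _ (PySem.Set.nodup_ofList row) (List.nodup_dedup row)
      (fun x => by simp [PySem.Set.mem_ofList, List.mem_dedup])
  have hB : check_alt row =
      (decide ((a0 + (a0 :: t).getLast htne) ^ 2 >
          (row.map (fun x => x * x)).sum - a0 * a0
            - (a0 :: t).getLast htne * (a0 :: t).getLast htne)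
        || (((row.dedup.countP (fun x => row.count x == 3) : Int) == 1)
            && ((row.dedup.countP (fun x => row.count x == 1) : Int) == 3))) := by
    simp only [check_alt, e2, foldl4_split, foldl_min_eq, foldl_max_eq, hmn, hmx, hctr, hvals,
      foldl2_split, List.countP_map, Function.comp_def, zero_add]
    rw [hcast3, hcast1, hset3, hset1]
  rw [hA, hB]
  cases t with
  | nil =>
      have hrow1 : row = [a0] := List.perm_singleton.mp hperm.symm
      subst hrow1
      have hd3 : List.countP (fun x => List.count x [a0] == 3) [a0].dedup = 0 := by
        simp [List.dedup_cons_of_notMem]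
      have hd1 : List.countP (fun x => List.count x [a0] == 1) [a0].dedup = 1 := by
        simp [List.dedup_cons_of_notMem]
      simp only [hd3, hd1, List.getLast_singleton, List.tail_cons, List.dropLast_nil,
        List.map_nil, List.sum_nil, List.map_cons, List.sum_cons, zero_add, add_zero]
      by_cases h0 : a0 = 0
      · subst h0; norm_num; decide
      · have hne0 : a0 + a0 ≠ 0 := by omega
        have h1 : (a0 + a0) ^ 2 > 0 := by positivity
        have h2 : -(a0 * a0) < (a0 + a0) ^ 2 := by nlinarith
        have h2' : (a0 + a0) ^ 2 > a0 * a0 - a0 * a0 - a0 * a0 := by nlinarith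
        simp [h1, h2, h2']
  | cons b u =>
      have htne' : (b :: u) ≠ [] := by simp
      have hmid : (((a0 :: b :: u).tail.dropLast).map (fun i => i ^ 2)).sum
          = (row.map (fun x => x * x)).sum - a0 * a0
            - (a0 :: b :: u).getLast htne * (a0 :: b :: u).getLast htne := by
        simp only [List.tail_cons]
        rw [sum_middle a0 (b :: u) (fun i => i ^ 2) htne']
        have hmp : ((a0 :: b :: u).map (fun i => i ^ 2)).sum = (row.map (fun x => x * x)).sum := by
          have hfe : (fun i : Int => i ^ 2) = (fun x : Int => x * x) := funext (fun x => by ring)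
          have h1 := (hperm.map (fun i : Int => i ^ 2)).sum_eq
          rw [h1, hfe]
        rw [hmp]
        simp only [pow_two]
      rw [hmid, mul3_beq, one_mul,
        cast_beq_lit (List.countP (fun x => List.count x row == 3) row.dedup) 1 1 (by norm_num),
        cast_beq_lit (List.countP (fun x => List.count x row == 1) row.dedup) 3 3 (by norm_num)]

-- ===== VERDICT (by name: the statement is the Claim_ definition above) =====
theorem check_spec : Claim_equal_check := by
  intro row _ hpre
  unfold Spec_check
  exact check_spec_aux row hpre
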